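-- pv_equiv track=rewrite | github.com/Adam-Jimenez/binarysearch-editorials | Word Concatenation.py | solve
-- ===== SOURCE A (Python) =====
-- from functools import lru_cache
--
-- def solve(words):
--     seen=set(words)
--     @lru_cache(None)
--     def is_concat(word):
--         for i in range(1,len(word)):
--             left=word[:i]
--             right=word[i:]
--             if all(ss in seen or is_concat(ss) for ss in (left,right)):
--                 return True
--         return False
--     return sum(is_concat(w) for w in words)
-- ===== SOURCE B (Python) =====
-- def solve(words):
--     seen = set(words)
--     total = 0
--     for w in words:
--         n = len(w)
--         dp = [True]
--         for i in range(1, n):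
--             dp.append(any(dp[j] and w[j:i] in seen for j in range(i)))
--         if any(dp[j] and w[j:] in seen for j in range(1, n)):
--             total += 1
--     return total
-- ===== Notes on version B (the rewrite author's own statement) =====
-- stated objective: alternative
-- what changed: Replaces A's recursive try-every-split test (both halves checked by membership-or-recursion, memoized across words) by a per-word word-break DP over prefixes (dp[j] = prefix splits into seen words) with a final >=2-piece check; not faster in practice because A's cross-word cache amortises shared substrings.
import Mathlib
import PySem

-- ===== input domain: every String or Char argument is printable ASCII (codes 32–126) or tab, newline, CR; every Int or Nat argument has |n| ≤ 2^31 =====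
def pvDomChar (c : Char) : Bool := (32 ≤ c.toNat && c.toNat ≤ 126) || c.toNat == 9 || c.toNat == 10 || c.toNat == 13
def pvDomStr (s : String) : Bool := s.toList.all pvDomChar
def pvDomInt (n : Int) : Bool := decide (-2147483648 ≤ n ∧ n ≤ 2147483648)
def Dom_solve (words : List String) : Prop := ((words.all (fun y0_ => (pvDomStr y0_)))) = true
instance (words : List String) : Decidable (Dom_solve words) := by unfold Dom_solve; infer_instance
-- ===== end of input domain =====

-- B replaces A's recursive try-every-split-of-both-halves test by a per-word
-- word-break DP over prefixes with a final ≥2-piece check; same return value.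

-- ===== PORT A =====
-- strings are handled via their character lists (String membership coincides with
-- character-list membership); word[:i] / word[i:] are List.take / List.drop, exact for Nat i
def isConcatA (seen : List (List Char)) (w : List Char) : Bool :=
  (List.range' 1 (w.length - 1)).attach.any (fun ⟨i, hi⟩ =>
    (decide (w.take i ∈ seen) || isConcatA seen (w.take i)) &&
    (decide (w.drop i ∈ seen) || isConcatA seen (w.drop i)))
termination_by w.length
decreasing_by
  · have := List.mem_range'_1.mp hi
    simp [List.length_take]; omega
  · have := List.mem_range'_1.mp hi
    simp [List.length_drop]; omega

def solve (words : List String) : Int :=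
  let seen := PySem.Set.ofList (words.map String.toList)
  (words.map (fun w => if isConcatA seen w.toList then (1 : Int) else 0)).sum

-- ===== PORT B =====
def wordOK (seen : List (List Char)) (w : List Char) : Bool :=
  let n := w.length
  let dp := (List.range' 1 (n - 1)).foldl
    (fun dp i => dp ++ [(List.range i).any
        (fun j => dp.getD j false && decide ((w.drop j).take (i - j) ∈ seen))])
    [true]
  (List.range' 1 (n - 1)).any (fun j => dp.getD j false && decide (w.drop j ∈ seen))

def solve_alt (words : List String) : Int :=
  let seen := PySem.Set.ofList (words.map String.toList)
  words.foldl (fun total w => if wordOK seen w.toList then total + 1 else total) 0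

-- ===== PRECONDITION & SPEC =====
def Spec_solve (words : List String) (out : Int) : Prop := out = solve_alt words
instance (words : List String) (out : Int) : Decidable (Spec_solve words out) := by unfold Spec_solve; infer_instance

-- ===== CLAIM (what is proved, stated in full; the proofs are below) =====
def Claim_equal_solve : Prop := ∀ (words : List String), Dom_solve words → Spec_solve words (solve words)

-- ===== LEMMAS AND PROOFS =====

-- `Chain seen w`: w is a concatenation of ≥ 1 nonempty words of `seen`
inductive Chain (seen : List (List Char)) : List Char → Prop
  | single (w : List Char) : w ∈ seen → w ≠ [] → Chain seen w
  | cons (p s : List Char) : p ∈ seen → p ≠ [] → Chain seen s → Chain seen (p ++ s)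

-- `Chain2 seen w`: w is a concatenation of ≥ 2 nonempty words of `seen`
def Chain2 (seen : List (List Char)) (w : List Char) : Prop :=
  ∃ u v, w = u ++ v ∧ Chain seen u ∧ Chain seen v

theorem chain_ne_nil {seen : List (List Char)} {w : List Char} (h : Chain seen w) : w ≠ [] := by
  induction h with
  | single w hm hne => exact hne
  | cons p s hm hne hs ih => simp [hne]

theorem chain_append {seen : List (List Char)} {u v : List Char}
    (hu : Chain seen u) (hv : Chain seen v) : Chain seen (u ++ v) := by
  induction hu with
  | single w hm hne => exact Chain.cons w v hm hne hv
  | cons p s hm hne hs ih => rw [List.append_assoc]; exact Chain.cons p (s ++ v) hm hne ih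

theorem chain2_chain {seen : List (List Char)} {w : List Char} (h : Chain2 seen w) :
    Chain seen w := by
  obtain ⟨u, v, rfl, hu, hv⟩ := h
  exact chain_append hu hv

theorem chain_cases {seen : List (List Char)} {w : List Char} (h : Chain seen w) :
    (w ∈ seen ∧ w ≠ []) ∨ Chain2 seen w := by
  cases h with
  | single w hm hne => exact Or.inl ⟨hm, hne⟩
  | cons p s hm hne hs =>
    exact Or.inr ⟨p, s, rfl, Chain.single p hm hne, hs⟩

theorem isConcatA_iff_aux {seen : List (List Char)} :
    ∀ (n : Nat) (w : List Char), w.length < n → (isConcatA seen w = true ↔ Chain2 seen w) := by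
  intro n
  induction n with
  | zero => intro w h; omega
  | succ n ih =>
  intro w hwn
  have ihw : ∀ u : List Char, u.length < w.length →
      (isConcatA seen u = true ↔ Chain2 seen u) := fun u hu => ih u (by omega)
  rw [isConcatA]
  simp only [List.any_eq_true, List.mem_attach, true_and, Subtype.exists,
    Bool.and_eq_true, Bool.or_eq_true, decide_eq_true_eq]
  constructor
  · rintro ⟨i, hi, hl, hr⟩
    have hi' := List.mem_range'_1.mp hi
    have hiw : 1 ≤ i ∧ i < w.length := by omega
    have hL : Chain seen (w.take i) := by
      rcases hl with h | h
      · exact Chain.single _ h (by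
          have : (w.take i).length = i := by simp; omega
          intro hkk; rw [hkk] at this; simp at this; omega)
      · exact chain2_chain ((ihw _ (by simp [List.length_take]; omega)).mp h)
    have hR : Chain seen (w.drop i) := by
      rcases hr with h | h
      · exact Chain.single _ h (by
          have : (w.drop i).length = w.length - i := by simp
          intro hkk; rw [hkk] at this; simp at this; omega)
      · exact chain2_chain ((ihw _ (by simp [List.length_drop]; omega)).mp h)
    exact ⟨w.take i, w.drop i, (List.take_append_drop i w).symm, hL, hR⟩
  · rintro ⟨u, v, rfl, hu, hv⟩
    have hune := chain_ne_nil hu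
    have hvne := chain_ne_nil hv
    refine ⟨u.length, List.mem_range'_1.mpr (by
        have h1 : 1 ≤ u.length := List.length_pos_iff.mpr hune
        have h2 : 1 ≤ v.length := List.length_pos_iff.mpr hvne
        simp; omega), ?_, ?_⟩
    · rw [List.take_left]
      rcases chain_cases hu with ⟨hm, _⟩ | h2
      · exact Or.inl hm
      · refine Or.inr ((ihw u ?_).mpr h2)
        have : 1 ≤ v.length := List.length_pos_iff.mpr hvne
        simp; omega
    · rw [List.drop_left]
      rcases chain_cases hv with ⟨hm, _⟩ | h2
      · exact Or.inl hm
      · refine Or.inr ((ihw v ?_).mpr h2)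
        have : 1 ≤ u.length := List.length_pos_iff.mpr hune
        simp; omega

theorem isConcatA_iff {seen : List (List Char)} (w : List Char) :
    isConcatA seen w = true ↔ Chain2 seen w :=
  isConcatA_iff_aux (w.length + 1) w (by omega)

-- last-piece characterization of Chain (the shape the DP uses)
theorem chain_last {seen : List (List Char)} {u : List Char} :
    Chain seen u ↔ ∃ j, j < u.length ∧ (j = 0 ∨ Chain seen (u.take j)) ∧ u.drop j ∈ seen := by
  constructor
  · intro h
    induction h with
    | single w hm hne =>
      exact ⟨0, List.length_pos_iff.mpr hne, Or.inl rfl, by simpa using hm⟩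
    | cons p s hm hne hs ih =>
      obtain ⟨j, hj, hch, hdr⟩ := ih
      refine ⟨p.length + j, by simp; omega, ?_, ?_⟩
      · right
        have htk : (p ++ s).take (p.length + j) = p ++ s.take j := by
          simp [List.take_append]
        rw [htk]
        rcases hch with rfl | hch
        · simpa using Chain.single p hm hne
        · exact chain_append (Chain.single p hm hne) hch
      · have hdp : (p ++ s).drop (p.length + j) = s.drop j := by
          simp [List.drop_append]
        rw [hdp]; exact hdr
  · rintro ⟨j, hj, hch, hdr⟩
    have hne : u.drop j ≠ [] := by
      intro hk
      have := congrArg List.length hk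
      simp at this; omega
    rcases hch with rfl | hch
    · exact Chain.single u (by simpa using hdr) (by
        intro hk; rw [hk] at hj; simp at hj)
    · have := chain_append hch (Chain.single (u.drop j) hdr hne)
      simpa using this

-- the dp list built by wordOK's fold (named for the invariant proof)
def dpFold (seen : List (List Char)) (w : List Char) (m : Nat) : List Bool :=
  (List.range' 1 m).foldl
    (fun dp i => dp ++ [(List.range i).any
        (fun j => dp.getD j false && decide ((w.drop j).take (i - j) ∈ seen))])
    [true]

theorem dpFold_succ (seen : List (List Char)) (w : List Char) (m : Nat) :
    dpFold seen w (m + 1) = dpFold seen w m ++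
      [(List.range (m + 1)).any (fun j => (dpFold seen w m).getD j false &&
          decide ((w.drop j).take (m + 1 - j) ∈ seen))] := by
  unfold dpFold
  rw [List.range'_concat, List.foldl_append]
  simp [Nat.add_comm 1 m]

theorem dpFold_length (seen : List (List Char)) (w : List Char) (m : Nat) :
    (dpFold seen w m).length = m + 1 := by
  induction m with
  | zero => simp [dpFold]
  | succ m ih => rw [dpFold_succ]; simp [ih]

theorem dpFold_invariant (seen : List (List Char)) (w : List Char) (m : Nat)
    (hm : m < w.length) :
    ∀ j ≤ m, ((dpFold seen w m).getD j false = true ↔ (j = 0 ∨ Chain seen (w.take j))) := by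
  induction m with
  | zero =>
    intro j hj
    interval_cases j
    simp [dpFold]
  | succ m ih =>
    intro j hj
    rw [dpFold_succ]
    rcases Nat.lt_or_ge j (m + 1) with hlt | hge
    · rw [List.getD_append _ _ _ _ (by rw [dpFold_length]; omega)]
      exact ih (by omega) j (by omega)
    · have hj' : j = m + 1 := by omega
      subst hj'
      rw [List.getD_append_right _ _ _ _ (by rw [dpFold_length]), dpFold_length]
      simp only [Nat.sub_self, List.getD_cons_zero]
      have hstep : ∀ j' : Nat, j' < m + 1 →
          (((dpFold seen w m).getD j' false = true) ↔ (j' = 0 ∨ Chain seen (w.take j'))) :=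
        fun j' hj' => ih (by omega) j' (by omega)
      constructor
      · intro h
        simp only [List.any_eq_true, List.mem_range, Bool.and_eq_true, decide_eq_true_eq] at h
        obtain ⟨j', hj', hdp, hmem⟩ := h
        right
        rw [chain_last]
        refine ⟨j', by simp; omega, ?_, ?_⟩
        · rcases (hstep j' hj').mp hdp with rfl | hc
          · exact Or.inl rfl
          · exact Or.inr (by rwa [List.take_take, Nat.min_eq_left (by omega)])
        · rw [List.drop_take]; exact hmem
      · rintro (h | h)
        · omega
        · rw [chain_last] at h
          obtain ⟨j', hj', hch, hdr⟩ := h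
          have hlen : (w.take (m + 1)).length = m + 1 := by simp; omega
          rw [hlen] at hj'
          simp only [List.any_eq_true, List.mem_range, Bool.and_eq_true, decide_eq_true_eq]
          refine ⟨j', hj', ?_, ?_⟩
          · refine (hstep j' hj').mpr ?_
            rcases hch with rfl | hch
            · exact Or.inl rfl
            · exact Or.inr (by rwa [List.take_take, Nat.min_eq_left (by omega)] at hch)
          · rwa [List.drop_take] at hdr
      
theorem wordOK_iff {seen : List (List Char)} {w : List Char} :
    wordOK seen w = true ↔ Chain2 seen w := by
  unfold wordOK
  simp only [List.any_eq_true, Bool.and_eq_true, decide_eq_true_eq]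
  show (∃ j ∈ List.range' 1 (w.length - 1),
      (dpFold seen w (w.length - 1)).getD j false = true ∧ w.drop j ∈ seen) ↔ _
  constructor
  · rintro ⟨j, hj, hdp, hmem⟩
    have hj' := List.mem_range'_1.mp hj
    have hjw : 1 ≤ j ∧ j < w.length := by omega
    have hinv := (dpFold_invariant seen w (w.length - 1) (by omega) j (by omega)).mp hdp
    rcases hinv with rfl | hc
    · omega
    · refine ⟨w.take j, w.drop j, (List.take_append_drop j w).symm, hc, ?_⟩
      exact Chain.single _ hmem (by
        intro hk; have := congrArg List.length hk; simp at this; omega)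
  · intro h
    -- use the last-piece decomposition of w
    have hch : Chain seen w := chain2_chain h
    obtain ⟨u, v, rfl, hu, hv⟩ := h
    obtain ⟨j, hj, hvch, hvdr⟩ := chain_last.mp hv
    have hune : u ≠ [] := chain_ne_nil hu
    have hul : 1 ≤ u.length := List.length_pos_iff.mpr hune
    refine ⟨u.length + j, List.mem_range'_1.mpr (by simp; omega), ?_, ?_⟩
    · refine (dpFold_invariant seen (u ++ v) (((u ++ v).length) - 1) (by simp; omega)
        (u.length + j) (by simp; omega)).mpr ?_
      right
      have htk : (u ++ v).take (u.length + j) = u ++ v.take j := by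
        simp [List.take_append]
      rw [htk]
      rcases hvch with rfl | hvch
      · simpa using hu
      · exact chain_append hu hvch
    · have hdp : (u ++ v).drop (u.length + j) = v.drop j := by
        simp [List.drop_append]
      rw [hdp]; exact hvdr

theorem perword_eq (seen : List (List Char)) (w : List Char) :
    isConcatA seen w = wordOK seen w :=
  Bool.eq_iff_iff.mpr ((isConcatA_iff w).trans wordOK_iff.symm)

theorem sum_foldl_eq (seen : List (List Char)) (ws : List String) :
    ∀ t : Int,
      t + ((ws.map (fun w => if isConcatA seen w.toList then (1 : Int) else 0)).sum)
        = ws.foldl (fun total w => if wordOK seen w.toList then total + 1 else total) t := by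
  induction ws with
  | nil => intro t; simp
  | cons w ws ih =>
    intro t
    simp only [List.map_cons, List.sum_cons, List.foldl_cons, perword_eq seen w.toList]
    rw [← ih (if wordOK seen w.toList then t + 1 else t)]
    split <;> ring

-- ===== VERDICT (by name: the statement is the Claim_ definition above) =====
theorem solve_spec : Claim_equal_solve := by
  intro words _
  unfold Spec_solve solve solve_alt
  have := sum_foldl_eq (PySem.Set.ofList (words.map String.toList)) words 0
  simpa using this
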